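-- pv_equiv track=rewrite | github.com/nzrnshannen/python-files | concepts/prog-puzzles/check-nineteen-five_occur.py | checkFunc
-- ===== SOURCE A (Python) =====
-- def checkFunc(list):
--     chckr = False
--     itr = 0
--     for i in list:
--         if i == 19:
--             itr+=1
--
--     if itr == 2:
--         itr = 0
--         chckr = True
--         for j in list:
--             if j == 5:
--                 itr+=1
--
--     return True if itr >= 3 and chckr else False
-- ===== SOURCE B (Python) =====
-- def checkFunc(list):
--     n19 = 0
--     n5 = 0
--     for x in list:
--         if x == 19:
--             n19 += 1
--             if n19 > 2:
--                 return False
--         elif x == 5: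
--             n5 += 1
--     return n19 == 2 and n5 >= 3
-- ===== Notes on version B (the rewrite author's own statement) =====
-- stated objective: alternative
-- what changed: Replaces A's two staged full scans (count the 19s, then conditionally rescan for 5s under a boolean flag) by one fused left-to-right pass that maintains both tallies simultaneously and returns False immediately on the third 19, never looking at the rest of the input.
import Mathlib
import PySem

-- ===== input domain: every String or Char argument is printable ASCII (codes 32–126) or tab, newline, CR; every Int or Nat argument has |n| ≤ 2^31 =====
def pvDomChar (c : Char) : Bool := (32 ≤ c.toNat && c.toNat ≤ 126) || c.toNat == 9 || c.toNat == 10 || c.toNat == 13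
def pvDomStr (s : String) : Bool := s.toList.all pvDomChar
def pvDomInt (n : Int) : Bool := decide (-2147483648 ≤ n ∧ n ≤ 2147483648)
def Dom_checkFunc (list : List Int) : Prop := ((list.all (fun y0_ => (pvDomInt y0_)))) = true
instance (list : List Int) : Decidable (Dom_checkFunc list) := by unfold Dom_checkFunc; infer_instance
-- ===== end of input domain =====

-- ===== PORT A =====
-- A: two staged full scans with a flag; B: one fused pass with early exit on the third 19. Return value only.
def checkFunc (list : List Int) : Bool :=
  let chckr := false
  let itr : Int := list.foldl (fun acc i => if i == 19 then acc + 1 else acc) 0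
  if itr == 2 then
    let itr2 : Int := list.foldl (fun acc j => if j == 5 then acc + 1 else acc) 0
    let chckr2 := true
    if itr2 ≥ 3 && chckr2 then true else false
  else
    if itr ≥ 3 && chckr then true else false

-- ===== PORT B =====
-- single fused pass carrying both tallies; short-circuits to false on the third 19
def checkFuncGo (rest : List Int) (n19 n5 : Int) : Bool :=
  match rest with
  | [] => n19 == 2 && n5 ≥ 3
  | x :: xs =>
    if x == 19 then
      if n19 + 1 > 2 then false else checkFuncGo xs (n19 + 1) n5
    else if x == 5 then checkFuncGo xs n19 (n5 + 1)
    else checkFuncGo xs n19 n5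

def checkFunc_alt (list : List Int) : Bool := checkFuncGo list 0 0

-- ===== PRECONDITION & SPEC =====
def Spec_checkFunc (list : List Int) (out : Bool) : Prop := out = checkFunc_alt list
instance (list : List Int) (out : Bool) : Decidable (Spec_checkFunc list out) := by unfold Spec_checkFunc; infer_instance

-- ===== CLAIM (what is proved, stated in full; the proofs are below) =====
def Claim_equal_checkFunc : Prop := ∀ (list : List Int), Dom_checkFunc list → Spec_checkFunc list (checkFunc list)

-- ===== LEMMAS AND PROOFS =====

-- ===== VERDICT (by name: the statement is the Claim_ definition above) =====
lemma foldl_count (l : List Int) (k : Int) (a : Int) :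
    l.foldl (fun acc i => if i == k then acc + 1 else acc) a = a + l.count k := by
  induction l generalizing a with
  | nil => simp
  | cons x xs ih =>
    rw [List.foldl_cons, List.count_cons]
    by_cases h : x = k
    · rw [if_pos (by simp [h]), ih]
      simp [h]
      omega
    · rw [if_neg (by simp [h]), ih]
      simp [h]

lemma go_cons (x : Int) (xs : List Int) (a b : Int) :
    checkFuncGo (x :: xs) a b =
      (if x == 19 then
        if a + 1 > 2 then false else checkFuncGo xs (a + 1) b
      else if x == 5 then checkFuncGo xs a (b + 1)
      else checkFuncGo xs a b) := rfl

lemma go_char (l : List Int) (a b : Int) (ha : a ≤ 2) :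
    checkFuncGo l a b = decide (a + l.count 19 = 2 ∧ b + l.count 5 ≥ 3) := by
  induction l generalizing a b with
  | nil =>
    rw [Bool.eq_iff_iff]
    simp only [checkFuncGo, List.count_nil, Int.natCast_zero, add_zero,
      Bool.and_eq_true, beq_iff_eq, decide_eq_true_eq, ge_iff_le]
  | cons x xs ih =>
    rw [go_cons]
    by_cases h19 : x = 19
    · subst h19
      have hc19 : (((19 : Int) :: xs).count 19 : Int) = (xs.count 19 : Int) + 1 := by
        simp
      have hc5 : (((19 : Int) :: xs).count 5 : Int) = (xs.count 5 : Int) := by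
        simp
      rw [if_pos (by decide), hc19, hc5]
      by_cases h : a + 1 > 2
      · rw [if_pos h]
        exact (decide_eq_false (by omega)).symm
      · rw [if_neg h, ih (a + 1) b (by omega), decide_eq_decide]
        omega
    · rw [if_neg (by simp [h19])]
      by_cases h5 : x = 5
      · subst h5
        have hc19 : (((5 : Int) :: xs).count 19 : Int) = (xs.count 19 : Int) := by
          simp
        have hc5 : (((5 : Int) :: xs).count 5 : Int) = (xs.count 5 : Int) + 1 := by
          simp
        rw [if_pos (by decide), ih a (b + 1) ha, hc19, hc5, decide_eq_decide]
        omega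
      · have hc19 : ((x :: xs).count 19 : Int) = (xs.count 19 : Int) := by
          simp [List.count_cons, h19]
        have hc5 : ((x :: xs).count 5 : Int) = (xs.count 5 : Int) := by
          simp [List.count_cons, h5]
        rw [if_neg (by simp [h5]), ih a b ha, hc19, hc5]

theorem checkFunc_spec : Claim_equal_checkFunc := by
  intro list _
  unfold Spec_checkFunc checkFunc checkFunc_alt
  rw [go_char list 0 0 (by omega), foldl_count, foldl_count]
  by_cases h19 : (list.count 19 : Int) = 2
  · simp [h19]
  · simp [h19]
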